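-- pv_equiv track=rewrite | github.com/aiulian25/fina | app/routes/csv_import.py | detect_columns
-- ===== SOURCE A (Python) =====
-- def detect_columns(headers):
--     """Auto-detect which columns contain date, description, amount"""
--     headers_lower = [h.lower().strip() if h else '' for h in headers]
--
--     mapping = {
--         'date': None,
--         'description': None,
--         'amount': None,
--         'debit': None,
--         'credit': None,
--         'category': None
--     }
--
--     # Date column keywords
--     date_keywords = ['date', 'data', 'fecha', 'datum', 'transaction date', 'trans date', 'posting date']
--     for idx, name in enumerate(headers_lower):
--         if any(keyword in name for keyword in date_keywords):
--             mapping['date'] = idx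
--             break
--
--     # Description column keywords - prioritize "name" for merchant/payee names
--     # First try to find "name" column (commonly used for merchant/payee)
--     for idx, name in enumerate(headers_lower):
--         if name == 'name' or 'payee' in name or 'merchant name' in name:
--             mapping['description'] = idx
--             break
--
--     # If no "name" column, look for other description columns
--     if mapping['description'] is None:
--         desc_keywords = ['description', 'descriere', 'descripción', 'details', 'detalii', 'merchant',
--                         'comerciant', 'narrative', 'memo', 'particulars', 'transaction details']
--         for idx, name in enumerate(headers_lower):
--             if any(keyword in name for keyword in desc_keywords):
--                 mapping['description'] = idx
--                 break
--
--     # Category column keywords (optional) - avoid generic "type" column that contains payment types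
--     # Only use "category" explicitly, not "type" which often contains payment methods
--     for idx, name in enumerate(headers_lower):
--         if name == 'category' or 'categorie' in name or 'categoría' in name:
--             mapping['category'] = idx
--             break
--
--     # Amount columns
--     amount_keywords = ['amount', 'suma', 'monto', 'valoare', 'value']
--     debit_keywords = ['debit', 'withdrawal', 'retragere', 'spent', 'expense', 'cheltuială', 'out']
--     credit_keywords = ['credit', 'deposit', 'depunere', 'income', 'venit', 'in']
--
--     for idx, name in enumerate(headers_lower):
--         if any(keyword in name for keyword in debit_keywords):
--             mapping['debit'] = idx
--         elif any(keyword in name for keyword in credit_keywords):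
--             mapping['credit'] = idx
--         elif any(keyword in name for keyword in amount_keywords) and mapping['amount'] is None:
--             mapping['amount'] = idx
--
--     return mapping
-- ===== SOURCE B (Python) =====
-- def detect_columns(headers):
--     """Auto-detect which columns contain date, description, amount (single pass)."""
--     headers_lower = [h.lower().strip() if h else '' for h in headers]
--
--     date_keywords = ['date', 'data', 'fecha', 'datum', 'transaction date', 'trans date', 'posting date']
--     desc_keywords = ['description', 'descriere', 'descripción', 'details', 'detalii', 'merchant',
--                      'comerciant', 'narrative', 'memo', 'particulars', 'transaction details']
--     amount_keywords = ['amount', 'suma', 'monto', 'valoare', 'value']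
--     debit_keywords = ['debit', 'withdrawal', 'retragere', 'spent', 'expense', 'cheltuială', 'out']
--     credit_keywords = ['credit', 'deposit', 'depunere', 'income', 'venit', 'in']
--
--     date = name_desc = fallback_desc = category = None
--     debit = credit = amount = None
--
--     for idx, name in enumerate(headers_lower):
--         if date is None and any(k in name for k in date_keywords):
--             date = idx
--         if name_desc is None and (name == 'name' or 'payee' in name or 'merchant name' in name):
--             name_desc = idx
--         if fallback_desc is None and any(k in name for k in desc_keywords):
--             fallback_desc = idx
--         if category is None and (name == 'category' or 'categorie' in name or 'categoría' in name):
--             category = idx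
--         if any(k in name for k in debit_keywords):
--             debit = idx
--         elif any(k in name for k in credit_keywords):
--             credit = idx
--         elif amount is None and any(k in name for k in amount_keywords):
--             amount = idx
--
--     return {
--         'date': date,
--         'description': name_desc if name_desc is not None else fallback_desc,
--         'amount': amount,
--         'debit': debit,
--         'credit': credit,
--         'category': category,
--     }
-- ===== Notes on version B (the rewrite author's own statement) =====
-- stated objective: alternative
-- what changed: Replaced A's five separate scans over the headers (each with its own break/guard logic and a mutated dict) by one single pass that tracks seven candidate variables (first matches for date/category/amount and the two description tiers, last matches for debit/credit) and builds the result dict once at the end.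
import Mathlib
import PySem

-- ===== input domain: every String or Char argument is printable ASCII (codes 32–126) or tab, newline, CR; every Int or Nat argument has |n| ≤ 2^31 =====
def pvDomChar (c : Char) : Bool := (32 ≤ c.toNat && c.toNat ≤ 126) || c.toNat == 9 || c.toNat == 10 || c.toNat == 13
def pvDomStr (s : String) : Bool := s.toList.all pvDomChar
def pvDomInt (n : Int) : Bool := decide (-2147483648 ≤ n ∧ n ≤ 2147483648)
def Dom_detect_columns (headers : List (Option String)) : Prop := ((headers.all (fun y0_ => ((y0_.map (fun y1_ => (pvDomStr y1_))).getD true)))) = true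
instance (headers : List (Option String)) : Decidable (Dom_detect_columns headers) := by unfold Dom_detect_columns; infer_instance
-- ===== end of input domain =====

-- B replaces A's five separate scans of the headers by one single pass tracking
-- candidate variables; same results, different decomposition (objective: alternative).

-- ===== PORT A =====
-- shared data/helpers: the keyword lists and per-header predicates (identical text in both Pythons)
def pvLowerStrip (h : Option String) : String :=
  match h with
  | none => ""
  | some s => if s = "" then "" else PySem.Str.strip (PySem.Str.lower s)

def pvKwDate : List String := ["date", "data", "fecha", "datum", "transaction date", "trans date", "posting date"]
def pvKwDesc : List String := ["description", "descriere", "descripción", "details", "detalii", "merchant", "comerciant", "narrative", "memo", "particulars", "transaction details"]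
def pvKwAmount : List String := ["amount", "suma", "monto", "valoare", "value"]
def pvKwDebit : List String := ["debit", "withdrawal", "retragere", "spent", "expense", "cheltuială", "out"]
def pvKwCredit : List String := ["credit", "deposit", "depunere", "income", "venit", "in"]

def pvAnyKw (name : String) (kws : List String) : Bool := kws.any (fun k => PySem.Str.isIn k name)

def pvIsDate (n : String) : Bool := pvAnyKw n pvKwDate
def pvIsName (n : String) : Bool := n == "name" || PySem.Str.isIn "payee" n || PySem.Str.isIn "merchant name" n
def pvIsDesc (n : String) : Bool := pvAnyKw n pvKwDesc
def pvIsCat (n : String) : Bool := n == "category" || PySem.Str.isIn "categorie" n || PySem.Str.isIn "categoría" n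
def pvIsDebit (n : String) : Bool := pvAnyKw n pvKwDebit
def pvIsCredit (n : String) : Bool := pvAnyKw n pvKwCredit
def pvIsAmount (n : String) : Bool := pvAnyKw n pvKwAmount

-- A's 'for idx, name in enumerate(...): if p(name): write idx; break'
def pvA_findIdx (p : String → Bool) : List String → Int → Option Int
  | [], _ => none
  | n :: rest, idx => if p n then some idx else pvA_findIdx p rest (idx + 1)

-- A's last loop; state = the three dict entries it mutates (debit, credit, amount)
def pvA_amountLoop : List String → Int → Option Int → Option Int → Option Int → Option Int × Option Int × Option Int
  | [], _, db, cr, am => (db, cr, am)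
  | n :: rest, idx, db, cr, am =>
    if pvIsDebit n then pvA_amountLoop rest (idx + 1) (some idx) cr am
    else if pvIsCredit n then pvA_amountLoop rest (idx + 1) db (some idx) am
    else if pvIsAmount n && am.isNone then pvA_amountLoop rest (idx + 1) db cr (some idx)
    else pvA_amountLoop rest (idx + 1) db cr am

def detect_columns (headers : List (Option String)) : List (String × Option Int) :=
  let hl := headers.map pvLowerStrip
  let m0 : PySem.Dict String (Option Int) :=
    (((((PySem.Dict.empty.insert "date" none).insert "description" none).insert "amount" none).insert "debit" none).insert "credit" none).insert "category" none
  let m1 := match pvA_findIdx pvIsDate hl 0 with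
    | some i => m0.insert "date" (some i)
    | none => m0
  let m2 := match pvA_findIdx pvIsName hl 0 with
    | some i => m1.insert "description" (some i)
    | none => m1
  let m3 := if (m2.getD "description" none).isNone then
      match pvA_findIdx pvIsDesc hl 0 with
      | some i => m2.insert "description" (some i)
      | none => m2
    else m2
  let m4 := match pvA_findIdx pvIsCat hl 0 with
    | some i => m3.insert "category" (some i)
    | none => m3
  let t := pvA_amountLoop hl 0 none none none
  ((((m4.insert "debit" t.1).insert "credit" t.2.1).insert "amount" t.2.2)).items

-- ===== PORT B =====
-- Source B's single pass: first-match candidates for date / name-tier desc / fallback desc /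
-- category, last-match for debit/credit, first-match amount inside the elif chain
def pvB_loop : List String → Int → Option Int → Option Int → Option Int → Option Int → Option Int → Option Int → Option Int →
    Option Int × Option Int × Option Int × Option Int × Option Int × Option Int × Option Int
  | [], _, dt, nd, fb, ct, db, cr, am => (dt, nd, fb, ct, db, cr, am)
  | n :: rest, idx, dt, nd, fb, ct, db, cr, am =>
    let dt' := if dt.isNone && pvIsDate n then some idx else dt
    let nd' := if nd.isNone && pvIsName n then some idx else nd
    let fb' := if fb.isNone && pvIsDesc n then some idx else fb
    let ct' := if ct.isNone && pvIsCat n then some idx else ct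
    if pvIsDebit n then pvB_loop rest (idx + 1) dt' nd' fb' ct' (some idx) cr am
    else if pvIsCredit n then pvB_loop rest (idx + 1) dt' nd' fb' ct' db (some idx) am
    else if am.isNone && pvIsAmount n then pvB_loop rest (idx + 1) dt' nd' fb' ct' db cr (some idx)
    else pvB_loop rest (idx + 1) dt' nd' fb' ct' db cr am

def detect_columns_alt (headers : List (Option String)) : List (String × Option Int) :=
  let hl := headers.map pvLowerStrip
  match pvB_loop hl 0 none none none none none none none with
  | (dt, nd, fb, ct, db, cr, am) =>
    [("date", dt),
     ("description", match nd with | some i => some i | none => fb),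
     ("amount", am),
     ("debit", db),
     ("credit", cr),
     ("category", ct)]

-- ===== PRECONDITION & SPEC =====
def Spec_detect_columns (headers : List (Option String)) (out : List (String × Option Int)) : Prop := out = detect_columns_alt headers
instance (headers : List (Option String)) (out : List (String × Option Int)) : Decidable (Spec_detect_columns headers out) := by unfold Spec_detect_columns; infer_instance

-- ===== CLAIM (what is proved, stated in full; the proofs are below) =====
def Claim_equal_detect_columns : Prop := ∀ (headers : List (Option String)), Dom_detect_columns headers → Spec_detect_columns headers (detect_columns headers)

-- ===== LEMMAS AND PROOFS =====
def pvFirst (p : String → Bool) (l : List String) (idx : Int) (o : Option Int) : Option Int :=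
  match o with
  | some i => some i
  | none => pvA_findIdx p l idx

theorem pvFirst_nil (p : String → Bool) (idx : Int) (o : Option Int) : pvFirst p [] idx o = o := by
  cases o <;> rfl

theorem pvFirst_cons (p : String → Bool) (n : String) (rest : List String) (idx : Int) (o : Option Int) :
    pvFirst p (n :: rest) idx o = pvFirst p rest (idx + 1) (if o.isNone && p n then some idx else o) := by
  cases o <;> by_cases h : p n <;> simp [pvFirst, pvA_findIdx, h]

theorem pvB_loop_eq (l : List String) (idx : Int) (dt nd fb ct db cr am : Option Int) :
    pvB_loop l idx dt nd fb ct db cr am =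
      (pvFirst pvIsDate l idx dt, pvFirst pvIsName l idx nd, pvFirst pvIsDesc l idx fb,
       pvFirst pvIsCat l idx ct, pvA_amountLoop l idx db cr am) := by
  induction l generalizing idx dt nd fb ct db cr am with
  | nil => simp [pvB_loop, pvA_amountLoop, pvFirst_nil]
  | cons n rest ih =>
    simp only [pvB_loop, pvA_amountLoop]
    by_cases h1 : pvIsDebit n
    · simp [h1, ih, pvFirst_cons]
    · by_cases h2 : pvIsCredit n
      · simp [h1, h2, ih, pvFirst_cons]
      · by_cases h3 : pvIsAmount n
        · cases am <;> simp [h1, h2, h3, ih, pvFirst_cons]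
        · simp [h1, h2, h3, ih, pvFirst_cons]

-- ===== VERDICT (by name: the statement is the Claim_ definition above) =====
theorem detect_columns_spec : Claim_equal_detect_columns := by
  intro headers _
  unfold Spec_detect_columns detect_columns detect_columns_alt
  simp only [pvB_loop_eq, pvFirst]
  cases hd : pvA_findIdx pvIsDate (headers.map pvLowerStrip) 0 <;>
    cases hn : pvA_findIdx pvIsName (headers.map pvLowerStrip) 0 <;>
      cases hc : pvA_findIdx pvIsCat (headers.map pvLowerStrip) 0 <;>
        cases hf : pvA_findIdx pvIsDesc (headers.map pvLowerStrip) 0 <;>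
          rfl
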